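-- pv_equiv track=rewrite | github.com/coraremos/Curso-Softex-Python-01-RJ-C1 | modulo_3/50exercicios_casa/1. listas/e5.py | verificar_duplicatas
-- ===== SOURCE A (Python) =====
-- from collections import Counter
--
-- def verificar_duplicatas(lista:list) -> list[tuple]:
--     """Retorna uma lista de tuplas (elemento, frequência) apenas para elementos duplicados."""
--     counts = Counter(lista)
--
--     return [
--         (item, freq)
--         for item, freq
--         in counts.items()
--         if freq > 1
--         ]
--     """ new_list = [expressão for item in interável if condição]
--         base: Retorna uma lista "[]";
--         expressão: que gera os valores 'item' e 'frequência' em tupla;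
--         for: para cada item,frequência dentro da contagem dos itens
--         condição: somente considerar se a frequência for maior que um"""
-- ===== SOURCE B (Python) =====
-- def verificar_duplicatas(lista: list) -> list:
--     """Retorna uma lista de tuplas (elemento, frequência) apenas para elementos duplicados."""
--     seen = set()
--     result = []
--     for item in lista:
--         if item not in seen:
--             seen.add(item)
--             freq = lista.count(item)
--             if freq > 1:
--                 result.append((item, freq))
--     return result
-- ===== Notes on version B (the rewrite author's own statement) =====
-- stated objective: alternative
-- what changed: Replaces the Counter table + items() comprehension by a single pass with a seen-set that calls lista.count per first-seen element, appending (item, freq) in first-appearance order when freq > 1.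
import Mathlib
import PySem

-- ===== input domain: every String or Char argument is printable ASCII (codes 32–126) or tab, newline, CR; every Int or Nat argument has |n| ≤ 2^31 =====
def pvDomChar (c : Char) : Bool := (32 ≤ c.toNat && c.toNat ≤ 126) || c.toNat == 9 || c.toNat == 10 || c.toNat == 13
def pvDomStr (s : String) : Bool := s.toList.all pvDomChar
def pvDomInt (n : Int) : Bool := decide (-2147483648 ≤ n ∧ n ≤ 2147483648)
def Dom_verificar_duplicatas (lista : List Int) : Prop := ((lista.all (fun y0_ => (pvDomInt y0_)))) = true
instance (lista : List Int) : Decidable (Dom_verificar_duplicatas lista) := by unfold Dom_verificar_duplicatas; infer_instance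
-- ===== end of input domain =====

-- B replaces the Counter table by a one-pass seen-set loop with list.count per first-seen element (alternative decomposition, same results).

-- ===== PORT A =====
-- counts = Counter(lista); [(item, freq) for item, freq in counts.items() if freq > 1]
def verificar_duplicatas (lista : List Int) : List (Int × Int) :=
  let counts := PySem.Dict.counter lista
  counts.items.filter (fun p => 1 < p.2)

-- ===== PORT B =====
-- seen = set(); result = []; for item in lista: if item not in seen: seen.add(item);
--   freq = lista.count(item); if freq > 1: result.append((item, freq)); return result
def verificar_duplicatas_alt (lista : List Int) : List (Int × Int) :=
  (lista.foldl
    (fun (st : PySem.Set Int × List (Int × Int)) item =>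
      if PySem.Set.contains st.1 item then st
      else
        let seen := PySem.Set.add st.1 item
        let freq : Int := PySem.List.count lista item
        if 1 < freq then (seen, st.2 ++ [(item, freq)]) else (seen, st.2))
    (PySem.Set.empty, [])).2

-- ===== PRECONDITION & SPEC =====
def Spec_verificar_duplicatas (lista : List Int) (out : List (Int × Int)) : Prop := out = verificar_duplicatas_alt lista
instance (lista : List Int) (out : List (Int × Int)) : Decidable (Spec_verificar_duplicatas lista out) := by unfold Spec_verificar_duplicatas; infer_instance

-- ===== CLAIM (what is proved, stated in full; the proofs are below) =====
def Claim_equal_verificar_duplicatas : Prop := ∀ (lista : List Int), Dom_verificar_duplicatas lista → Spec_verificar_duplicatas lista (verificar_duplicatas lista)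

-- ===== LEMMAS AND PROOFS =====

-- filtering the survivors of a discard against s equals filtering against s.add x
lemma discard_filter (x : Int) (s : PySem.Set Int) (m : List Int) :
    (PySem.Set.discard m x).filter (fun y => !(PySem.Set.contains s y))
      = m.filter (fun y => !(PySem.Set.contains (PySem.Set.add s x) y)) := by
  unfold PySem.Set.discard
  rw [List.filter_filter]
  apply List.filter_congr
  intro y _
  have hA : (PySem.Set.contains (PySem.Set.add s x) y = true) ↔ (y ∈ s ∨ y = x) := by
    rw [PySem.Set.contains_iff, PySem.Set.mem_add]
  have hS : (PySem.Set.contains s y = true) ↔ y ∈ s := PySem.Set.contains_iff s y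
  by_cases h1 : y ∈ s <;> by_cases h2 : y = x <;> simp_all

-- the B loop, with seen = s and result = r, appends the not-yet-seen first occurrences paired with their full-list count, filtered by count > 1
lemma alt_loop_spec (full : List Int) (l : List Int) (s : PySem.Set Int) (r : List (Int × Int)) :
    l.foldl
      (fun (st : PySem.Set Int × List (Int × Int)) item =>
        if PySem.Set.contains st.1 item then st
        else
          let seen := PySem.Set.add st.1 item
          let freq : Int := PySem.List.count full item
          if 1 < freq then (seen, st.2 ++ [(item, freq)]) else (seen, st.2))
      (s, r)
    = (PySem.Set.update s l,
       r ++ (((PySem.Set.ofList l).filter (fun y => !(PySem.Set.contains s y))).map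
              (fun k => (k, (PySem.List.count full k : Int)))).filter (fun p => 1 < p.2)) := by
  induction l generalizing s r with
  | nil => simp [PySem.Set.update, PySem.Set.ofList, PySem.Set.empty]
  | cons x l ih =>
    simp only [List.foldl_cons]
    by_cases hx : x ∈ s
    · have hc : PySem.Set.contains s x = true := (PySem.Set.contains_iff s x).mpr hx
      simp only [hc, if_true]
      rw [ih, PySem.Set.update_cons, PySem.Set.add_of_mem hx, PySem.Set.ofList_cons,
        List.filter_cons_of_neg (by simpa [hc] using hx), discard_filter, PySem.Set.add_of_mem hx]
    · have hc : PySem.Set.contains s x = false := by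
        rw [Bool.eq_false_iff]; intro h; exact hx ((PySem.Set.contains_iff s x).mp h)
      simp only [hc, if_false, Bool.false_eq_true]
      rw [PySem.Set.update_cons, PySem.Set.ofList_cons,
        List.filter_cons_of_pos (by simpa [hc] using hx), List.map_cons]
      by_cases hf : (1 : Int) < (PySem.List.count full x : Int)
      · rw [if_pos hf, ih, List.filter_cons_of_pos (by simpa using hf), discard_filter]
        simp
      · rw [if_neg hf, ih, List.filter_cons_of_neg (by simpa using hf), discard_filter]

theorem alt_eq (lista : List Int) :
    verificar_duplicatas_alt lista
      = (((PySem.Set.ofList lista).map (fun k => (k, (PySem.List.count lista k : Int)))).filter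
          (fun p => 1 < p.2)) := by
  unfold verificar_duplicatas_alt
  rw [alt_loop_spec lista lista PySem.Set.empty []]
  simp [PySem.Set.contains, PySem.Set.empty]

-- ===== VERDICT (by name: the statement is the Claim_ definition above) =====
theorem verificar_duplicatas_spec : Claim_equal_verificar_duplicatas := by
  intro lista _
  unfold Spec_verificar_duplicatas verificar_duplicatas
  rw [alt_eq]
  simp only [PySem.Dict.items_counter]
  rfl
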